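-- pv_equiv track=rewrite | github.com/karishmatank/ls-core | py-110/other_practice/strictly_increasing_substr.py | find_increasing_substrings
-- ===== SOURCE A (Python) =====
-- def check_substring(digit_str):
--     digits = [int(substr) for substr in digit_str]
--     for idx in range(1, len(digits)):
--         if digits[idx] - digits[idx - 1] != 1:
--             return False
--     return True
--
-- def find_increasing_substrings(digits):
--     substrings = []
--     for idx_start in range(0, len(digits) - 1):
--         for idx_end in range(idx_start + 2, len(digits) + 1):
--             substring = digits[idx_start:idx_end]
--             if check_substring(substring):
--                 substrings.append(substring)
--             else:
--                 break
--
--     return [int(substr) for substr in substrings]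
-- ===== SOURCE B (Python) =====
-- def find_increasing_substrings(digits):
--     # Single left-to-right scan over maximal +1-runs; emit each run's substrings directly.
--     if len(digits) < 2:
--         return []
--     nums = [int(c) for c in digits]
--     n = len(nums)
--     subs = []
--     i = 0
--     while i < n:
--         j = i
--         while j + 1 < n and nums[j + 1] - nums[j] == 1:
--             j += 1
--         for s in range(i, j):
--             for e in range(s + 1, j + 1):
--                 subs.append(digits[s:e + 1])
--         i = j + 1
--     return [int(sub) for sub in subs]
-- ===== Notes on version B (the rewrite author's own statement) =====
-- stated objective: faster
-- what changed: A re-slices, re-parses and re-checks every candidate substring from every start (and breaks on the first failure); B parses the digits once, finds each maximal +1-run in a single scan, and emits every substring of each run directly with no per-candidate checking.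
import Mathlib
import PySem

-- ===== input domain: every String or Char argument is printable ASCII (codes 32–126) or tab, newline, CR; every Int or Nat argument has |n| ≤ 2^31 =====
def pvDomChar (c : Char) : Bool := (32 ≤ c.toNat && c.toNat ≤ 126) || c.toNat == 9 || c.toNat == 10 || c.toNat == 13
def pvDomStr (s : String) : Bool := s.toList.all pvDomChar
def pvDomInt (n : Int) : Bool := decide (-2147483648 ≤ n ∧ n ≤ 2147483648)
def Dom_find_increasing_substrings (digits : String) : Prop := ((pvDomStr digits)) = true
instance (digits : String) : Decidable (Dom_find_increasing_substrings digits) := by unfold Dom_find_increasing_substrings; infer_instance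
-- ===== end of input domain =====

-- B replaces A's re-parse-and-recheck of every candidate substring with a single scan over
-- maximal +1-runs, emitting each run's substrings directly (objective: faster).

-- ===== PORT A =====

-- int(s); under Pre_ every parsed string is all-digits, so ofStr? is always `some`
def pyInt (s : String) : Int := (PySem.Int.ofStr? s).getD 0

-- check_substring's loop 'for idx in range(1, len(digits)): if …: return False' (early return)
def csLoop (ds : List Int) : List Int → Bool
  | [] => true
  | idx :: rest =>
    if PySem.List.pyGetD ds idx 0 - PySem.List.pyGetD ds (idx - 1) 0 ≠ 1 then false
    else csLoop ds rest

def check_substring (digit_str : String) : Bool :=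
  let ds := digit_str.toList.map (fun c => pyInt (String.ofList [c]))
  csLoop ds (PySem.List.pyRange 1 (PySem.List.len ds) 1)

-- inner 'for idx_end …: if check: append else: break' (break = stop consuming the range)
def innerA (digits : String) (s : Int) : List Int → List String
  | [] => []
  | e :: rest =>
    let sub := PySem.Str.slice digits (some s) (some e)
    if check_substring sub then sub :: innerA digits s rest else []

def find_increasing_substrings (digits : String) : List Int :=
  let substrings := (PySem.List.pyRange 0 (PySem.Str.len digits - 1) 1).foldl
    (fun acc s => acc ++ innerA digits s (PySem.List.pyRange (s + 2) (PySem.Str.len digits + 1) 1)) []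
  substrings.map (fun sub => pyInt sub)

-- ===== PORT B =====

-- 'while j + 1 < n and nums[j+1] - nums[j] == 1: j += 1'
-- (fuel-guarded structural loop; every call supplies fuel ≥ the number of iterations left)
def findJ (nums : List Int) (n : Int) : Nat → Int → Int
  | 0, j => j
  | fuel + 1, j =>
    if j + 1 < n ∧ PySem.List.pyGetD nums (j + 1) 0 - PySem.List.pyGetD nums j 0 = 1 then
      findJ nums n fuel (j + 1)
    else j

-- 'for s in range(i, j): for e in range(s+1, j+1): subs.append(digits[s:e+1])'
def runEmit (digits : String) (i j : Int) (acc : List String) : List String :=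
  (PySem.List.pyRange i j 1).foldl (fun acc s =>
    acc ++ (PySem.List.pyRange (s + 1) (j + 1) 1).map
      (fun e => PySem.Str.slice digits (some s) (some (e + 1)))) acc

-- the outer 'while i < n' loop (fuel-guarded; i advances by at least 1 per iteration)
def outerB (digits : String) (nums : List Int) (n : Int) : Nat → Int → List String → List String
  | 0, _, acc => acc
  | fuel + 1, i, acc =>
    if i < n then
      outerB digits nums n fuel (findJ nums n (n - i).toNat i + 1)
        (runEmit digits i (findJ nums n (n - i).toNat i) acc)
    else acc

def find_increasing_substrings_alt (digits : String) : List Int :=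
  if PySem.Str.len digits < 2 then []
  else
    let nums := digits.toList.map (fun c => pyInt (String.ofList [c]))
    (outerB digits nums (PySem.List.len nums) (PySem.List.len nums).toNat 0 []).map
      (fun sub => pyInt sub)

-- ===== PRECONDITION & SPEC =====
-- Python A raises ValueError (int of a non-digit character) whenever len(digits) >= 2 and some
-- character is not an ASCII digit; those inputs are excluded. On len < 2 A returns [] for any chars.
def Pre_find_increasing_substrings (digits : String) : Prop :=
  PySem.Str.len digits < 2 ∨ digits.toList.all (fun c => c.isDigit) = true
instance (digits : String) : Decidable (Pre_find_increasing_substrings digits) := by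
  unfold Pre_find_increasing_substrings; infer_instance
def pvWitness_find_increasing_substrings : String := "123459"

def Spec_find_increasing_substrings (digits : String) (out : List Int) : Prop := out = find_increasing_substrings_alt digits
instance (digits : String) (out : List Int) : Decidable (Spec_find_increasing_substrings digits out) := by unfold Spec_find_increasing_substrings; infer_instance

-- ===== CLAIM (what is proved, stated in full; the proofs are below) =====
def Claim_equal_find_increasing_substrings : Prop := ∀ (digits : String), Dom_find_increasing_substrings digits → Pre_find_increasing_substrings digits → Spec_find_increasing_substrings digits (find_increasing_substrings digits)

-- ===== LEMMAS AND PROOFS =====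

theorem findJ_neg (nums : List Int) (n : Int) (fuel : Nat) (j : Int)
    (hg : ¬ (j + 1 < n ∧ PySem.List.pyGetD nums (j + 1) 0 - PySem.List.pyGetD nums j 0 = 1)) :
    findJ nums n fuel j = j := by
  cases fuel with
  | zero => rfl
  | succ f => rw [findJ, if_neg hg]

theorem findJ_pos (nums : List Int) (n : Int) (fuel : Nat) (j : Int)
    (hg : j + 1 < n ∧ PySem.List.pyGetD nums (j + 1) 0 - PySem.List.pyGetD nums j 0 = 1) :
    findJ nums n (fuel + 1) j = findJ nums n fuel (j + 1) := by
  rw [findJ, if_pos hg]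

theorem le_findJ (nums : List Int) (n : Int) (fuel : Nat) (j : Int) :
    j ≤ findJ nums n fuel j := by
  induction fuel generalizing j with
  | zero => exact le_refl j
  | succ f ih =>
    by_cases hg : j + 1 < n ∧ PySem.List.pyGetD nums (j + 1) 0 - PySem.List.pyGetD nums j 0 = 1
    · rw [findJ_pos nums n f j hg]; have := ih (j + 1); omega
    · rw [findJ_neg nums n (f + 1) j hg]

theorem findJ_lt (nums : List Int) (n : Int) (fuel : Nat) (j : Int) (h : j < n) :
    findJ nums n fuel j < n := by
  induction fuel generalizing j with
  | zero => exact h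
  | succ f ih =>
    by_cases hg : j + 1 < n ∧ PySem.List.pyGetD nums (j + 1) 0 - PySem.List.pyGetD nums j 0 = 1
    · rw [findJ_pos nums n f j hg]; exact ih (j + 1) hg.1
    · rw [findJ_neg nums n (f + 1) j hg]; exact h

theorem findJ_diff (nums : List Int) (n : Int) (fuel : Nat) (j k : Int)
    (h1 : j ≤ k) (h2 : k < findJ nums n fuel j) :
    PySem.List.pyGetD nums (k + 1) 0 - PySem.List.pyGetD nums k 0 = 1 := by
  induction fuel generalizing j with
  | zero => simp only [findJ] at h2; omega
  | succ f ih =>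
    by_cases hg : j + 1 < n ∧ PySem.List.pyGetD nums (j + 1) 0 - PySem.List.pyGetD nums j 0 = 1
    · rw [findJ_pos nums n f j hg] at h2
      rcases eq_or_lt_of_le h1 with rfl | hlt
      · exact hg.2
      · exact ih (j + 1) (by omega) h2
    · rw [findJ_neg nums n (f + 1) j hg] at h2; omega

theorem findJ_fuel (nums : List Int) (n : Int) (f1 f2 : Nat) (j : Int)
    (hf1 : n ≤ j + 1 + (f1 : Int)) (hf2 : n ≤ j + 1 + (f2 : Int)) :
    findJ nums n f1 j = findJ nums n f2 j := by
  induction f1 generalizing f2 j with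
  | zero =>
    have hg : ¬ (j + 1 < n ∧ PySem.List.pyGetD nums (j + 1) 0 - PySem.List.pyGetD nums j 0 = 1) := by
      intro h; omega
    rw [findJ_neg nums n 0 j hg, findJ_neg nums n f2 j hg]
  | succ f ih =>
    by_cases hg : j + 1 < n ∧ PySem.List.pyGetD nums (j + 1) 0 - PySem.List.pyGetD nums j 0 = 1
    · cases f2 with
      | zero => omega
      | succ f2' =>
        rw [findJ_pos nums n f j hg, findJ_pos nums n f2' j hg]
        exact ih f2' (j + 1) (by omega) (by omega)
    · rw [findJ_neg nums n (f + 1) j hg, findJ_neg nums n f2 j hg]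

theorem findJ_stop (nums : List Int) (n : Int) (fuel : Nat) (j : Int)
    (hf : n ≤ j + 1 + (fuel : Int)) :
    ¬ (findJ nums n fuel j + 1 < n ∧
       PySem.List.pyGetD nums (findJ nums n fuel j + 1) 0 - PySem.List.pyGetD nums (findJ nums n fuel j) 0 = 1) := by
  induction fuel generalizing j with
  | zero => simp only [findJ]; intro h; omega
  | succ f ih =>
    by_cases hg : j + 1 < n ∧ PySem.List.pyGetD nums (j + 1) 0 - PySem.List.pyGetD nums j 0 = 1
    · rw [findJ_pos nums n f j hg]; exact ih (j + 1) (by push_cast at hf ⊢; omega)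
    · rw [findJ_neg nums n (f + 1) j hg]; exact hg

theorem findJ_between (nums : List Int) (n : Int) (fuel : Nat) (j : Int)
    (hf : n ≤ j + 1 + (fuel : Int)) (f2 : Nat) (s : Int) (hf2 : n ≤ s + 1 + (f2 : Int))
    (h1 : j ≤ s) (h2 : s ≤ findJ nums n fuel j) :
    findJ nums n f2 s = findJ nums n fuel j := by
  induction fuel generalizing j with
  | zero =>
    simp only [findJ] at h2 ⊢
    have hsj : s = j := by omega
    subst hsj
    exact findJ_neg nums n f2 s (by intro h; omega)
  | succ f ih =>
    by_cases hg : j + 1 < n ∧ PySem.List.pyGetD nums (j + 1) 0 - PySem.List.pyGetD nums j 0 = 1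
    · rw [findJ_pos nums n f j hg] at h2 ⊢
      rcases eq_or_lt_of_le h1 with rfl | hlt
      · cases f2 with
        | zero => omega
        | succ f2' =>
          rw [findJ_pos nums n f2' j hg]
          exact findJ_fuel nums n f2' f (j + 1) (by push_cast at hf2 ⊢; omega) (by push_cast at hf ⊢; omega)
      · exact ih (j + 1) (by push_cast at hf ⊢; omega) (by omega) h2
    · rw [findJ_neg nums n (f + 1) j hg] at h2 ⊢
      have hsj : s = j := le_antisymm h2 h1
      subst hsj
      exact findJ_neg nums n f2 s hg

theorem csLoop_iff (ds : List Int) (t : Int) :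
    csLoop ds (PySem.List.pyRange t (PySem.List.len ds) 1) = true ↔
    (∀ k : Int, t ≤ k → k < (ds.length : Int) →
      PySem.List.pyGetD ds k 0 - PySem.List.pyGetD ds (k - 1) 0 = 1) := by
  rw [show PySem.List.len ds = (ds.length : Int) from by simp]
  generalize hm : ((ds.length : Int) - t).toNat = m
  induction m generalizing t with
  | zero =>
    rw [PySem.List.pyRange_one_eq_nil (by omega)]
    simp only [csLoop]
    constructor
    · intro _ k hk1 hk2; omega
    · intro _; trivial
  | succ m ih =>
    have hlt : t < (ds.length : Int) := by omega
    rw [PySem.List.pyRange_one_cons hlt]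
    simp only [csLoop]
    by_cases hd : PySem.List.pyGetD ds t 0 - PySem.List.pyGetD ds (t - 1) 0 = 1
    · rw [if_neg (by simpa using hd), ih (t + 1) (by omega)]
      constructor
      · intro h k hk1 hk2
        rcases eq_or_lt_of_le hk1 with rfl | hk
        · exact hd
        · exact h k (by omega) hk2
      · intro h k hk1 hk2; exact h k (by omega) hk2
    · rw [if_pos (by simpa using hd)]
      constructor
      · intro h; exact absurd h (by simp)
      · intro h; exact absurd (h t le_rfl hlt) hd

theorem pyGetD_drop_take (xs : List Int) (a m : Nat) (i : Int) (h0 : 0 ≤ i) (hm : i < (m : Int))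
    (hl : a + i.toNat < xs.length) :
    PySem.List.pyGetD ((xs.drop a).take m) i 0 = PySem.List.pyGetD xs ((a : Int) + i) 0 := by
  have hlen : ((xs.drop a).take m).length = min m (xs.length - a) := by
    simp [List.length_take, List.length_drop]
  have hA : i < (((xs.drop a).take m).length : Int) := by
    rw [hlen]; push_cast; omega
  have hB : (0:Int) ≤ (a : Int) + i := by omega
  have hC : (a : Int) + i < (xs.length : Int) := by omega
  rw [PySem.List.pyGetD_eq_getElem _ 0 h0 hA, PySem.List.pyGetD_eq_getElem _ 0 hB hC]
  rw [List.getElem_take, List.getElem_drop]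
  congr 1
  omega

theorem check_eq (digits : String) (s e : Int) (hs : 0 ≤ s) (hse : s ≤ e)
    (he : e ≤ (digits.toList.length : Int)) :
    (check_substring (PySem.Str.slice digits (some s) (some e)) = true) ↔
    (∀ k : Int, s ≤ k → k + 1 < e →
      PySem.List.pyGetD (digits.toList.map (fun c => pyInt (String.ofList [c]))) (k + 1) 0 -
      PySem.List.pyGetD (digits.toList.map (fun c => pyInt (String.ofList [c]))) k 0 = 1) := by
  have hcs : (PySem.Str.slice digits (some s) (some e)).toList
      = (digits.toList.drop s.toNat).take (e.toNat - s.toNat) := by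
    rw [PySem.Str.toList_slice, PySem.Chars.slice_eq_listSlice]
    exact PySem.List.slice_toNat _ hs (by omega)
  unfold check_substring
  simp only [hcs, List.map_take, List.map_drop]
  set nums := digits.toList.map (fun c => pyInt (String.ofList [c])) with hnums
  have hnl : (nums.length : Int) = (digits.toList.length : Int) := by
    simp [hnums]
  have hlen : ((((nums.drop s.toNat).take (e.toNat - s.toNat))).length : Int) = e - s := by
    simp only [List.length_take, List.length_drop]
    omega
  have hds : ∀ k : Int, 0 ≤ k → k < e - s →
      PySem.List.pyGetD ((nums.drop s.toNat).take (e.toNat - s.toNat)) k 0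
        = PySem.List.pyGetD nums (s + k) 0 := by
    intro k h1 h2
    have hh := pyGetD_drop_take nums s.toNat (e.toNat - s.toNat) k h1
      (by omega) (by omega)
    rw [hh, show ((s.toNat : Int) + k) = s + k from by omega]
  rw [csLoop_iff, hlen]
  constructor
  · intro h k hk1 hk2
    have hstep := h (k - s + 1) (by omega) (by omega)
    rw [show k - s + 1 - 1 = k - s from by ring] at hstep
    rw [hds (k - s + 1) (by omega) (by omega), hds (k - s) (by omega) (by omega)] at hstep
    rw [show s + (k - s + 1) = k + 1 from by ring, show s + (k - s) = k from by ring] at hstep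
    exact hstep
  · intro h k hk1 hk2
    rw [hds k (by omega) (by omega), hds (k - 1) (by omega) (by omega)]
    have hstep := h (s + k - 1) (by omega) (by omega)
    rw [show s + k - 1 + 1 = s + k from by ring] at hstep
    rw [show s + (k - 1) = s + k - 1 from by ring, show s + k = s + k from rfl]
    exact hstep

theorem flatMap_congr_mem {α β : Type} (l : List α) (f g : α → List β)
    (h : ∀ x ∈ l, f x = g x) : l.flatMap f = l.flatMap g := by
  induction l with
  | nil => rfl
  | cons x xs ih =>
    simp only [List.flatMap_cons, h x (List.mem_cons_self), ih (fun y hy => h y (List.mem_cons_of_mem _ hy))]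

theorem map_pyRange_shift {α : Type} (a b : Int) (g : Int → α) :
    (PySem.List.pyRange a b 1).map (fun e => g (e + 1)) = (PySem.List.pyRange (a + 1) (b + 1) 1).map g := by
  rw [PySem.List.pyRange_one, PySem.List.pyRange_one]
  have : (b + 1 - (a + 1)) = b - a := by ring
  rw [this]
  simp only [List.map_map]
  exact List.map_congr_left (fun k _ => by simp [Function.comp]; ring_nf)

theorem runEmit_eq (digits : String) (i j : Int) (acc : List String) :
    runEmit digits i j acc = acc ++ (PySem.List.pyRange i j 1).flatMap
      (fun s => (PySem.List.pyRange (s + 2) (j + 2) 1).map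
        (fun e => PySem.Str.slice digits (some s) (some e))) := by
  unfold runEmit
  rw [PySem.List.foldl_append_eq_flatMap]
  congr 1
  apply flatMap_congr_mem
  intro s _
  have h1 : s + 1 + 1 = s + 2 := by ring
  have h2 : j + 1 + 1 = j + 2 := by ring
  have h3 := map_pyRange_shift (s + 1) (j + 1) (fun e => PySem.Str.slice digits (some s) (some e))
  rw [h1, h2] at h3
  exact h3


theorem innerA_eq (digits : String) (s : Int) (hs : 0 ≤ s)
    (hsn : s < (digits.toList.length : Int)) (t : Int) (ht : s + 2 ≤ t)
    (ht2 : t ≤ findJ (digits.toList.map (fun c => pyInt (String.ofList [c]))) (digits.toList.length : Int) ((digits.toList.length : Int) - s).toNat s + 2) :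
    innerA digits s (PySem.List.pyRange t ((digits.toList.length : Int) + 1) 1) =
    (PySem.List.pyRange t (findJ (digits.toList.map (fun c => pyInt (String.ofList [c]))) (digits.toList.length : Int) ((digits.toList.length : Int) - s).toNat s + 2) 1).map
      (fun e => PySem.Str.slice digits (some s) (some e)) := by
  set nums := digits.toList.map (fun c => pyInt (String.ofList [c])) with hnums
  set n : Int := (digits.toList.length : Int) with hn
  set j : Int := findJ nums n (n - s).toNat s with hj
  have hfs : n ≤ s + 1 + ((n - s).toNat : Int) := by omega
  have hsj : s ≤ j := le_findJ nums n (n - s).toNat s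
  have hjn : j < n := findJ_lt nums n (n - s).toNat s hsn
  generalize hm : (j + 2 - t).toNat = m at *
  induction m generalizing t with
  | zero =>
    have htj : t = j + 2 := by omega
    subst htj
    rw [PySem.List.pyRange_one_eq_nil (le_refl (j + 2))]
    by_cases hc : n + 1 ≤ j + 2
    · rw [PySem.List.pyRange_one_eq_nil hc]
      simp [innerA]
    · rw [PySem.List.pyRange_one_cons (show j + 2 < n + 1 from by omega)]
      simp only [innerA]
      rw [if_neg]
      · simp
      · rw [check_eq digits s (j + 2) hs (by omega) (by rw [← hn]; omega)]
        intro hall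
        have hdj := hall j (by omega) (by omega)
        exact findJ_stop nums n (n - s).toNat s hfs (by rw [← hj]; exact ⟨by omega, hdj⟩)
  | succ m ih =>
    have ht3 : t < j + 2 := by omega
    rw [PySem.List.pyRange_one_cons (show t < n + 1 from by omega),
        PySem.List.pyRange_one_cons ht3]
    simp only [innerA, List.map_cons]
    rw [if_pos]
    · rw [ih (t + 1) (by omega) (by omega) (by omega)]
    · rw [check_eq digits s t hs (by omega) (by rw [← hn]; omega)]
      intro k hk1 hk2
      exact findJ_diff nums n (n - s).toNat s k hk1 (by omega)

theorem outerB_eq (digits : String) (nums : List Int) (n : Int) (fuel : Nat) (i : Int)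
    (acc : List String) (h0 : 0 ≤ i) (hf : n ≤ i + (fuel : Int)) :
    outerB digits nums n fuel i acc = acc ++ (PySem.List.pyRange i (n - 1) 1).flatMap
      (fun s => (PySem.List.pyRange (s + 2) (findJ nums n (n - s).toNat s + 2) 1).map
        (fun e => PySem.Str.slice digits (some s) (some e))) := by
  induction fuel generalizing i acc with
  | zero =>
    simp only [outerB]
    rw [PySem.List.pyRange_one_eq_nil (by push_cast at hf; omega)]
    simp
  | succ fuel ih =>
    by_cases h : i < n
    · rw [outerB, if_pos h]
      set j : Int := findJ nums n (n - i).toNat i with hj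
      have hfi : n ≤ i + 1 + (((n - i).toNat : Nat) : Int) := by omega
      have hij : i ≤ j := le_findJ nums n (n - i).toNat i
      have hjn : j < n := findJ_lt nums n (n - i).toNat i h
      rw [ih (j + 1) (runEmit digits i j acc) (by omega) (by push_cast at hf ⊢; omega), runEmit_eq]
      have hcongr : (PySem.List.pyRange i j 1).flatMap
          (fun s => (PySem.List.pyRange (s + 2) (j + 2) 1).map
            (fun e => PySem.Str.slice digits (some s) (some e)))
        = (PySem.List.pyRange i j 1).flatMap
          (fun s => (PySem.List.pyRange (s + 2) (findJ nums n (n - s).toNat s + 2) 1).map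
            (fun e => PySem.Str.slice digits (some s) (some e))) := by
        apply flatMap_congr_mem
        intro s hsmem
        rw [PySem.List.mem_pyRange_one] at hsmem
        rw [findJ_between nums n (n - i).toNat i hfi (n - s).toNat s (by omega) hsmem.1 (by omega)]
      by_cases hj2 : j = n - 1
      · rw [PySem.List.pyRange_one_eq_nil (show n - 1 ≤ j + 1 from by omega)]
        rw [hcongr, hj2]
        simp
      · rw [PySem.List.pyRange_one_append i (j + 1) (n - 1) (by omega) (by omega),
            List.flatMap_append,
            PySem.List.pyRange_one_succ_right hij,
            List.flatMap_append]
        simp only [List.flatMap_cons, List.flatMap_nil, List.append_nil]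
        rw [findJ_between nums n (n - i).toNat i hfi (n - j).toNat j (by omega) hij le_rfl,
            PySem.List.pyRange_one_eq_nil (le_refl (j + 2))]
        rw [hcongr]
        simp [List.append_assoc]
    · rw [outerB, if_neg h, PySem.List.pyRange_one_eq_nil (by omega)]
      simp

-- ===== VERDICT (by name: the statement is the Claim_ definition above) =====
theorem find_increasing_substrings_spec : Claim_equal_find_increasing_substrings := by
  unfold Claim_equal_find_increasing_substrings
  intro digits _ _
  unfold Spec_find_increasing_substrings
  unfold find_increasing_substrings find_increasing_substrings_alt
  have hlen : PySem.Str.len digits = (digits.toList.length : Int) := by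
    simp [PySem.Str.len]
  simp only [hlen]
  set nums := digits.toList.map (fun c => pyInt (String.ofList [c])) with hnums
  set n : Int := (digits.toList.length : Int) with hn
  rw [PySem.List.foldl_append_eq_flatMap]
  simp only [List.nil_append]
  have hAcongr : (PySem.List.pyRange 0 (n - 1) 1).flatMap
      (fun s => innerA digits s (PySem.List.pyRange (s + 2) (n + 1) 1))
    = (PySem.List.pyRange 0 (n - 1) 1).flatMap
      (fun s => (PySem.List.pyRange (s + 2) (findJ nums n (n - s).toNat s + 2) 1).map
        (fun e => PySem.Str.slice digits (some s) (some e))) := by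
    apply flatMap_congr_mem
    intro s hsmem
    rw [PySem.List.mem_pyRange_one] at hsmem
    exact innerA_eq digits s hsmem.1 (by omega) (s + 2) le_rfl
      (by rw [← hnums, ← hn]; have := le_findJ nums n (n - s).toNat s; omega)
  rw [hAcongr]
  by_cases h2 : n < 2
  · rw [if_pos h2, PySem.List.pyRange_one_eq_nil (show n - 1 ≤ 0 from by omega)]
    simp
  · rw [if_neg h2]
    have hlen2 : PySem.List.len nums = n := by
      simp [hnums, hn]
    rw [hlen2, outerB_eq digits nums n n.toNat 0 [] le_rfl (by omega), List.nil_append]
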